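-- pv_equiv track=rewrite | github.com/HM237/Codewars-Solutions | 6KyuKatas/Find Added.py | find_added
-- ===== SOURCE A (Python) =====
-- def find_added(st1, st2):
--     string1 = []
--     string2 = []
--     answer= []
--     for i in st1:
--         if i not in string1: string1.append(i)
--     for i in st2:
--         if i not in string2: string2.append(i)
--     for letter in string2:
--         if letter not in string1:
--             count = st2.count(letter)
--             for i in range(count):
--                 answer.append((letter))
--         else:
--             count1 = st1.count(letter)
--             count2 = st2.count(letter)
--             if count2 != count1:
--                 for i in range(count2- count1):
--                     answer.append((letter))
--     answer.sort()
--     answer = "".join(answer)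
--     return str(answer)
-- ===== SOURCE B (Python) =====
-- def find_added(st1, st2):
--     s1 = sorted(st1)
--     s2 = sorted(st2)
--     i = 0
--     j = 0
--     out = []
--     while i < len(s1) and j < len(s2):
--         if s1[i] == s2[j]:
--             i += 1
--             j += 1
--         elif s1[i] < s2[j]:
--             i += 1
--         else:
--             out.append(s2[j])
--             j += 1
--     out.extend(s2[j:])
--     return "".join(out)
-- ===== Notes on version B (the rewrite author's own statement) =====
-- stated objective: alternative
-- what changed: Replaces A's dedup lists, repeated str.count calls per distinct letter and a final sort by sorting both strings once and emitting the surplus characters of st2 with a single two-pointer merge, already in order.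
import Mathlib
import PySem

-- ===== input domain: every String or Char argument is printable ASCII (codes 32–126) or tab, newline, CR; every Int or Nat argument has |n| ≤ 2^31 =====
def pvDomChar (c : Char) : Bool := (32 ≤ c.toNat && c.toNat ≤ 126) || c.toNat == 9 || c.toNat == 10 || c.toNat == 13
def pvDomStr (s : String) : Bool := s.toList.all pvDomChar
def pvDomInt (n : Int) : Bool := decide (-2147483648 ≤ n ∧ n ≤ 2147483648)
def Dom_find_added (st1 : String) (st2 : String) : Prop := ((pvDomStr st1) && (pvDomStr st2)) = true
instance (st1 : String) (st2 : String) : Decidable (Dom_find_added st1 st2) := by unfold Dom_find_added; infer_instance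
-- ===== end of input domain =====

-- B replaces A's dedup-then-count-per-letter passes by a single two-pointer merge over the two sorted character lists (alternative algorithm).

-- ===== PORT A =====
-- 'if i not in string1: string1.append(i)' loops, then per distinct letter the count comparison;
-- Nat truncated subtraction count2 - count1 is exact: Python's range(count2-count1) is empty when negative.
def find_added (st1 : String) (st2 : String) : String :=
  let string1 := st1.toList.foldl (fun string1 i => if i ∈ string1 then string1 else string1 ++ [i]) []
  let string2 := st2.toList.foldl (fun string2 i => if i ∈ string2 then string2 else string2 ++ [i]) []
  let answer := string2.foldl (fun answer letter =>
    if letter ∉ string1 then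
      answer ++ List.replicate (st2.toList.count letter) letter
    else
      let count1 := st1.toList.count letter
      let count2 := st2.toList.count letter
      if count2 ≠ count1 then
        answer ++ List.replicate (count2 - count1) letter
      else answer) []
  String.mk (PySem.List.sorted answer (fun x => x) false)

-- ===== PORT B =====
-- the two-pointer while loop of Source B as structural recursion on the two sorted lists
def mergeDiff : List Char → List Char → List Char
  | [], s2 => s2
  | _ :: _, [] => []
  | x :: xs, y :: ys =>
    if x = y then mergeDiff xs ys
    else if x < y then mergeDiff xs (y :: ys)
    else y :: mergeDiff (x :: xs) ys
termination_by s1 s2 => s1.length + s2.length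

def find_added_alt (st1 : String) (st2 : String) : String :=
  String.mk (mergeDiff (PySem.List.sorted st1.toList (fun x => x) false)
                       (PySem.List.sorted st2.toList (fun x => x) false))

-- ===== PRECONDITION & SPEC =====
def Spec_find_added (st1 : String) (st2 : String) (out : String) : Prop := out = find_added_alt st1 st2
instance (st1 : String) (st2 : String) (out : String) : Decidable (Spec_find_added st1 st2 out) := by unfold Spec_find_added; infer_instance

-- ===== CLAIM (what is proved, stated in full; the proofs are below) =====
def Claim_equal_find_added : Prop := ∀ (st1 : String) (st2 : String), Dom_find_added st1 st2 → Spec_find_added st1 st2 (find_added st1 st2)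

-- ===== LEMMAS AND PROOFS =====

theorem mem_pyDedup (xs : List Char) (acc : List Char) (c : Char) :
    c ∈ xs.foldl (fun a i => if i ∈ a then a else a ++ [i]) acc ↔ c ∈ acc ∨ c ∈ xs := by
  induction xs generalizing acc with
  | nil => simp
  | cons x xs ih =>
    simp only [List.foldl_cons]
    by_cases hx : x ∈ acc
    · rw [if_pos hx, ih]
      simp only [List.mem_cons]
      constructor
      · tauto
      · rintro (h | h | h)
        · exact Or.inl h
        · exact Or.inl (h ▸ hx)
        · exact Or.inr h
    · rw [if_neg hx, ih]
      simp only [List.mem_append, List.mem_cons]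
      tauto

theorem nodup_pyDedup (xs : List Char) (acc : List Char) (h : acc.Nodup) :
    (xs.foldl (fun a i => if i ∈ a then a else a ++ [i]) acc).Nodup := by
  induction xs generalizing acc with
  | nil => simpa
  | cons x xs ih =>
    simp only [List.foldl_cons]
    by_cases hx : x ∈ acc
    · rw [if_pos hx]; exact ih acc h
    · rw [if_neg hx]
      refine ih _ ?_
      simp [List.nodup_append, h]
      exact fun a ha hax => hx (hax ▸ ha)

theorem foldl_append_chunks (f g : Char → List Char) (l : List Char) (acc : List Char)
    (h : ∀ c ∈ l, f c = g c) :
    l.foldl (fun a c => a ++ f c) acc = acc ++ l.flatMap g := by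
  induction l generalizing acc with
  | nil => simp
  | cons x l ih =>
    simp only [List.foldl_cons, List.flatMap_cons]
    rw [ih _ (fun c hc => h c (List.mem_cons_of_mem _ hc)), h x List.mem_cons_self,
      List.append_assoc]

theorem count_flatMap_replicate (n : Char → Nat) (c : Char) :
    ∀ l : List Char, l.Nodup →
      (l.flatMap (fun x => List.replicate (n x) x)).count c = if c ∈ l then n c else 0 := by
  intro l
  induction l with
  | nil => intro _; simp
  | cons x l ih =>
    intro hnd
    rw [List.nodup_cons] at hnd
    simp only [List.flatMap_cons, List.count_append, List.count_replicate]
    rw [ih hnd.2]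
    by_cases hcx : c = x
    · subst hcx
      simp [hnd.1]
    · simp [hcx, Ne.symm hcx]

theorem mem_mergeDiff (s1 s2 : List Char) (c : Char) (h : c ∈ mergeDiff s1 s2) : c ∈ s2 := by
  induction s1, s2 using mergeDiff.induct with
  | case1 s2 => simpa [mergeDiff] using h
  | case2 x xs => simp [mergeDiff] at h
  | case3 xs y ys ih =>
    rw [mergeDiff, if_pos rfl] at h
    exact List.mem_cons_of_mem _ (ih h)
  | case4 x xs y ys hxy hlt ih =>
    rw [mergeDiff, if_neg hxy, if_pos hlt] at h
    exact ih h
  | case5 x xs y ys hxy hlt ih =>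
    rw [mergeDiff, if_neg hxy, if_neg hlt] at h
    rcases List.mem_cons.mp h with h | h
    · exact List.mem_cons.mpr (Or.inl h)
    · exact List.mem_cons_of_mem _ (ih h)

theorem sorted_mergeDiff (s1 s2 : List Char)
    (h1 : s1.Pairwise (· ≤ ·)) (h2 : s2.Pairwise (· ≤ ·)) :
    (mergeDiff s1 s2).Pairwise (· ≤ ·) := by
  induction s1, s2 using mergeDiff.induct with
  | case1 s2 => simpa [mergeDiff] using h2
  | case2 x xs => simp [mergeDiff]
  | case3 xs y ys ih =>
    rw [mergeDiff, if_pos rfl]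
    exact ih h1.of_cons h2.of_cons
  | case4 x xs y ys hxy hlt ih =>
    rw [mergeDiff, if_neg hxy, if_pos hlt]
    exact ih h1.of_cons h2
  | case5 x xs y ys hxy hlt ih =>
    rw [mergeDiff, if_neg hxy, if_neg hlt]
    refine List.Pairwise.cons ?_ (ih h1 h2.of_cons)
    intro z hz
    exact (List.pairwise_cons.mp h2).1 z (mem_mergeDiff _ _ _ hz)

theorem count_mergeDiff (s1 s2 : List Char) (c : Char)
    (h1 : s1.Pairwise (· ≤ ·)) (h2 : s2.Pairwise (· ≤ ·)) :
    (mergeDiff s1 s2).count c = s2.count c - s1.count c := by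
  induction s1, s2 using mergeDiff.induct with
  | case1 s2 => simp [mergeDiff]
  | case2 x xs => simp [mergeDiff]
  | case3 xs y ys ih =>
    rw [mergeDiff, if_pos rfl, ih h1.of_cons h2.of_cons, List.count_cons, List.count_cons]
    split_ifs <;> omega
  | case4 x xs y ys hxy hlt ih =>
    rw [mergeDiff, if_neg hxy, if_pos hlt, ih h1.of_cons h2,
      List.count_cons (a := c) (b := x) (l := xs)]
    simp only [beq_iff_eq]
    split_ifs with hh
    · have hzero : List.count c (y :: ys) = 0 := by
        rw [List.count_eq_zero]
        intro hmem
        have hyc : y ≤ c := by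
          rcases List.mem_cons.mp hmem with hm | hm
          · exact le_of_eq hm.symm
          · exact (List.pairwise_cons.mp h2).1 c hm
        have hyx2 : y ≤ x := by rw [hh]; exact hyc
        exact absurd hlt (not_lt.mpr hyx2)
      omega
    · omega
  | case5 x xs y ys hxy hlt ih =>
    have hyx : y < x := by
      rcases lt_trichotomy x y with h | h | h
      · exact absurd h hlt
      · exact absurd h hxy
      · exact h
    rw [mergeDiff, if_neg hxy, if_neg hlt,
      List.count_cons (a := c) (b := y) (l := mergeDiff (x :: xs) ys), ih h1 h2.of_cons,
      List.count_cons (a := c) (b := y) (l := ys)]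
    simp only [beq_iff_eq]
    split_ifs with hh
    · have hzero : List.count c (x :: xs) = 0 := by
        rw [List.count_eq_zero]
        intro hmem
        have hxc : x ≤ c := by
          rcases List.mem_cons.mp hmem with hm | hm
          · exact le_of_eq hm.symm
          · exact (List.pairwise_cons.mp h1).1 c hm
        have : y < c := lt_of_lt_of_le hyx hxc
        rw [hh] at this
        exact absurd this (lt_irrefl c)
      omega
    · omega

-- A's answer list (before the final sort) counts every character c exactly (count c st2 - count c st1) times
theorem count_answer (st1 st2 : String) (c : Char) :
    ((st2.toList.foldl (fun s2 i => if i ∈ s2 then s2 else s2 ++ [i]) []).foldl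
      (fun answer letter =>
        if letter ∉ (st1.toList.foldl (fun s1 i => if i ∈ s1 then s1 else s1 ++ [i]) []) then
          answer ++ List.replicate (st2.toList.count letter) letter
        else
          if st2.toList.count letter ≠ st1.toList.count letter then
            answer ++ List.replicate (st2.toList.count letter - st1.toList.count letter) letter
          else answer) []).count c
    = st2.toList.count c - st1.toList.count c := by
  set string1 := st1.toList.foldl (fun s1 i => if i ∈ s1 then s1 else s1 ++ [i]) [] with hs1
  set string2 := st2.toList.foldl (fun s2 i => if i ∈ s2 then s2 else s2 ++ [i]) [] with hs2
  have hstep : (fun (answer : List Char) (letter : Char) =>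
      if letter ∉ string1 then
        answer ++ List.replicate (st2.toList.count letter) letter
      else
        if st2.toList.count letter ≠ st1.toList.count letter then
          answer ++ List.replicate (st2.toList.count letter - st1.toList.count letter) letter
        else answer)
      = (fun answer letter => answer ++
        (if letter ∉ string1 then
          List.replicate (st2.toList.count letter) letter
        else
          if st2.toList.count letter ≠ st1.toList.count letter then
            List.replicate (st2.toList.count letter - st1.toList.count letter) letter
          else [])) := by
    funext a l
    split_ifs <;> simp
  rw [hstep, foldl_append_chunks _
      (fun letter => List.replicate (st2.toList.count letter - st1.toList.count letter) letter)
      string2 [] ?_]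
  · rw [List.nil_append,
      count_flatMap_replicate _ c string2 (nodup_pyDedup _ _ List.nodup_nil)]
    split_ifs with hmem
    · rfl
    · have : c ∉ st2.toList := fun h => hmem ((mem_pyDedup _ _ _).mpr (Or.inr h))
      rw [List.count_eq_zero.mpr this]
      omega
  · intro l hl
    by_cases hin : l ∈ string1
    · simp only [hin, not_true_eq_false, if_false]
      split_ifs with hne
      · rfl
      · rw [Ne, not_not] at hne
        rw [hne]
        simp
    · have : l ∉ st1.toList := fun h => hin ((mem_pyDedup _ _ _).mpr (Or.inr h))
      simp [hin, List.count_eq_zero.mpr this]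

theorem sorted_lists_eq (l1 l2 : List Char)
    (h1 : l1.Pairwise (· ≤ ·)) (h2 : l2.Pairwise (· ≤ ·))
    (hc : ∀ c, l1.count c = l2.count c) : l1 = l2 :=
  List.Perm.eq_of_pairwise (fun _ _ _ _ hab hba => le_antisymm hab hba) h1 h2
    (List.perm_iff_count.mpr hc)

-- ===== VERDICT (by name: the statement is the Claim_ definition above) =====
theorem find_added_spec : Claim_equal_find_added := by
  intro st1 st2 _
  unfold Spec_find_added find_added find_added_alt
  simp only []
  congr 1
  apply sorted_lists_eq
  · have := PySem.List.sorted_pairwise (xs := (st2.toList.foldl (fun s2 i => if i ∈ s2 then s2 else s2 ++ [i]) []).foldl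
      (fun answer letter =>
        if letter ∉ (st1.toList.foldl (fun s1 i => if i ∈ s1 then s1 else s1 ++ [i]) []) then
          answer ++ List.replicate (st2.toList.count letter) letter
        else
          if st2.toList.count letter ≠ st1.toList.count letter then
            answer ++ List.replicate (st2.toList.count letter - st1.toList.count letter) letter
          else answer) []) (key := fun x => x)
    simpa using this
  · exact sorted_mergeDiff _ _
      (by simpa using PySem.List.sorted_pairwise (xs := st1.toList) (key := fun x => x))
      (by simpa using PySem.List.sorted_pairwise (xs := st2.toList) (key := fun x => x))
  · intro c
    rw [(PySem.List.sorted_perm _ _ _).count_eq,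
      count_mergeDiff _ _ c
        (by simpa using PySem.List.sorted_pairwise (xs := st1.toList) (key := fun x => x))
        (by simpa using PySem.List.sorted_pairwise (xs := st2.toList) (key := fun x => x)),
      (PySem.List.sorted_perm _ _ _).count_eq, (PySem.List.sorted_perm _ _ _).count_eq]
    exact count_answer st1 st2 c
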